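-- pv_equiv track=rewrite | github.com/malindeman1999/gradiometer | validations/test09_small_lmax_spotcheck.py | lm_index
-- ===== SOURCE A (Python) =====
-- def lm_index(lmax: int, l: int, m: int) -> int:
--     idx = 0
--     for l2 in range(lmax + 1):
--         for m2 in range(-l2, l2 + 1):
--             if l2 == l and m2 == m:
--                 return idx
--             idx += 1
--     return -1
-- ===== SOURCE B (Python) =====
-- def lm_index(lmax: int, l: int, m: int) -> int:
--     # Closed form: rows 0..l-1 contribute l**2 entries; within row l, m sits at offset l+m.
--     if 0 <= l <= lmax and -l <= m <= l:
--         return l * l + l + m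
--     return -1
-- ===== Notes on version B (the rewrite author's own statement) =====
-- stated objective: faster
-- what changed: Replaced the double loop over all (l2,m2) pairs by the closed-form index l*l+l+m with a bounds check returning -1 out of range.
import Mathlib
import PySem

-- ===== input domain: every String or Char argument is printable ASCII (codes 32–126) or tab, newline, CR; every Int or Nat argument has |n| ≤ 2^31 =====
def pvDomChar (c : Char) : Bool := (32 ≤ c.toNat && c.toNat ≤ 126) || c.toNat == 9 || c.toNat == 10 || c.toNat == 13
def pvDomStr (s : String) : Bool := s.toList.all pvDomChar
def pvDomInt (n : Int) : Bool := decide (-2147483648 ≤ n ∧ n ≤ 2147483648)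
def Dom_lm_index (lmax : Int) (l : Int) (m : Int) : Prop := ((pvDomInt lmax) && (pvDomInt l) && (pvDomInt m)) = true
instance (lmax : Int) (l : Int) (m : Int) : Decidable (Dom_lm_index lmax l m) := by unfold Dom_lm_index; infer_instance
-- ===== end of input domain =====

-- B replaces A's double loop over all (l2, m2) pairs by the closed form l*l + l + m with a bounds
-- check (objective: faster, O(1) instead of O(lmax^2)).

-- ===== PORT A =====
-- Early return from the double loop is modelled with a 'Int ⊕ Int' state:
-- 'Sum.inl idx' = still scanning with counter idx, 'Sum.inr r' = returned r.
-- One cell of the inner loop: 'if l2 == l and m2 == m: return idx' / 'idx += 1'.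
def pvCell (l : Int) (m : Int) (l2 : Int) (st : Int ⊕ Int) (m2 : Int) : Int ⊕ Int :=
  match st with
  | Sum.inr r => Sum.inr r
  | Sum.inl idx => if l2 = l ∧ m2 = m then Sum.inr idx else Sum.inl (idx + 1)

-- One row l2: 'for m2 in range(-l2, l2 + 1): …'.
def pvRow (l : Int) (m : Int) (st : Int ⊕ Int) (l2 : Int) : Int ⊕ Int :=
  match st with
  | Sum.inr r => Sum.inr r
  | Sum.inl idx => (PySem.List.pyRange (-l2) (l2 + 1) 1).foldl (pvCell l m l2) (Sum.inl idx)

def lm_index (lmax : Int) (l : Int) (m : Int) : Int :=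
  match (PySem.List.pyRange 0 (lmax + 1) 1).foldl (pvRow l m) (Sum.inl 0) with
  | Sum.inr r => r
  | Sum.inl _ => -1

-- ===== PORT B =====
def lm_index_alt (lmax : Int) (l : Int) (m : Int) : Int :=
  if 0 ≤ l ∧ l ≤ lmax ∧ -l ≤ m ∧ m ≤ l then l * l + l + m else -1

-- ===== PRECONDITION & SPEC =====
def Spec_lm_index (lmax : Int) (l : Int) (m : Int) (out : Int) : Prop := out = lm_index_alt lmax l m
instance (lmax : Int) (l : Int) (m : Int) (out : Int) : Decidable (Spec_lm_index lmax l m out) := by unfold Spec_lm_index; infer_instance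

-- ===== CLAIM (what is proved, stated in full; the proofs are below) =====
def Claim_equal_lm_index : Prop := ∀ (lmax : Int) (l : Int) (m : Int), Dom_lm_index lmax l m → Spec_lm_index lmax l m (lm_index lmax l m)

-- ===== LEMMAS AND PROOFS =====

theorem foldl_pvCell_inr (l m l2 r : Int) (xs : List Int) :
    xs.foldl (pvCell l m l2) (Sum.inr r) = Sum.inr r := by
  induction xs with
  | nil => rfl
  | cons x xs ih => simpa [pvCell] using ih

theorem foldl_pvRow_inr (l m r : Int) (xs : List Int) :
    xs.foldl (pvRow l m) (Sum.inr r) = Sum.inr r := by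
  induction xs with
  | nil => rfl
  | cons x xs ih => simpa [pvRow] using ih

-- The inner loop from start a up to l2 (inclusive), with counter idx.
theorem inner_char (l m l2 : Int) : ∀ (n : ℕ) (a idx : Int), a ≤ l2 + 1 → (l2 + 1 - a).toNat = n →
    (PySem.List.pyRange a (l2 + 1) 1).foldl (pvCell l m l2) (Sum.inl idx) =
      if l2 = l ∧ a ≤ m ∧ m ≤ l2 then Sum.inr (idx + (m - a)) else Sum.inl (idx + (l2 + 1 - a)) := by
  intro n
  induction n with
  | zero =>
    intro a idx hle h
    have hba : l2 + 1 ≤ a := by omega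
    rw [PySem.List.pyRange_one_eq_nil hba]
    have : ¬ (l2 = l ∧ a ≤ m ∧ m ≤ l2) := by rintro ⟨_, h2, h3⟩; omega
    simp only [List.foldl_nil, if_neg this]
    congr 1; omega
  | succ n ih =>
    intro a idx hle h
    have hab : a < l2 + 1 := by omega
    rw [PySem.List.pyRange_one_cons hab, List.foldl_cons]
    by_cases hc : l2 = l ∧ a = m
    · simp only [pvCell, if_pos hc]
      rw [foldl_pvCell_inr]
      have : l2 = l ∧ a ≤ m ∧ m ≤ l2 := ⟨hc.1, by omega, by omega⟩
      rw [if_pos this]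
      congr 1; omega
    · simp only [pvCell, if_neg hc]
      rw [ih (a + 1) (idx + 1) (by omega) (by omega)]
      by_cases hd : l2 = l ∧ a + 1 ≤ m ∧ m ≤ l2
      · rw [if_pos hd, if_pos (⟨hd.1, by omega, by omega⟩ : l2 = l ∧ a ≤ m ∧ m ≤ l2)]
        congr 1; omega
      · rw [if_neg hd, if_neg (by rintro ⟨h1, h2, h3⟩; exact hd ⟨h1, by omega, h3⟩ : ¬ (l2 = l ∧ a ≤ m ∧ m ≤ l2))]
        congr 1; omega

-- The outer loop from row a on: it returns l*l + l + m - a*a past the counter, or never matches.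
theorem outer_char (l m lmax : Int) : ∀ (n : ℕ) (a idx : Int), 0 ≤ a → (lmax + 1 - a).toNat = n →
    (if a ≤ l ∧ l ≤ lmax ∧ -l ≤ m ∧ m ≤ l then
       (PySem.List.pyRange a (lmax + 1) 1).foldl (pvRow l m) (Sum.inl idx) =
         Sum.inr (idx + (l * l - a * a) + (l + m))
     else ∃ j, (PySem.List.pyRange a (lmax + 1) 1).foldl (pvRow l m) (Sum.inl idx) = Sum.inl j) := by
  intro n
  induction n with
  | zero =>
    intro a idx ha h
    have hba : lmax + 1 ≤ a := by omega
    rw [PySem.List.pyRange_one_eq_nil hba]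
    rw [if_neg (by omega : ¬ (a ≤ l ∧ l ≤ lmax ∧ -l ≤ m ∧ m ≤ l))]
    exact ⟨idx, rfl⟩
  | succ n ih =>
    intro a idx ha h
    have hab : a < lmax + 1 := by omega
    rw [PySem.List.pyRange_one_cons hab, List.foldl_cons]
    have hrow : pvRow l m (Sum.inl idx) a =
        if a = l ∧ -a ≤ m ∧ m ≤ a then Sum.inr (idx + (m - -a)) else Sum.inl (idx + (a + 1 - -a)) := by
      simp only [pvRow]
      exact inner_char l m a ((a + 1 - -a).toNat) (-a) idx (by omega) rfl
    by_cases hc : a = l ∧ -a ≤ m ∧ m ≤ a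
    · rw [hrow, if_pos hc, foldl_pvRow_inr]
      rw [if_pos (by omega : a ≤ l ∧ l ≤ lmax ∧ -l ≤ m ∧ m ≤ l)]
      congr 1
      have : a = l := hc.1
      subst this; ring
    · rw [hrow, if_neg hc]
      have := ih (a + 1) (idx + (a + 1 - -a)) (by omega) (by omega)
      by_cases hd : a + 1 ≤ l ∧ l ≤ lmax ∧ -l ≤ m ∧ m ≤ l
      · rw [if_pos hd] at this
        rw [if_pos (by omega : a ≤ l ∧ l ≤ lmax ∧ -l ≤ m ∧ m ≤ l)]
        rw [this]; congr 1; ring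
      · rw [if_neg hd] at this
        rw [if_neg (by omega : ¬ (a ≤ l ∧ l ≤ lmax ∧ -l ≤ m ∧ m ≤ l))]
        exact this

-- ===== VERDICT (by name: the statement is the Claim_ definition above) =====
theorem lm_index_spec : Claim_equal_lm_index := by
  intro lmax l m _
  unfold Spec_lm_index lm_index lm_index_alt
  have := outer_char l m lmax ((lmax + 1 - 0).toNat) 0 0 le_rfl rfl
  by_cases hc : 0 ≤ l ∧ l ≤ lmax ∧ -l ≤ m ∧ m ≤ l
  · rw [if_pos hc] at this
    rw [this, if_pos hc]; ring
  · rw [if_neg hc] at this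
    obtain ⟨j, hj⟩ := this
    rw [hj, if_neg hc]
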